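-- pv_equiv track=rewrite | github.com/healthonrails/annolid | annolid/core/agent/tools/sampling.py | _normalize_indices
-- ===== SOURCE A (Python) =====
-- from typing import Iterable, List, Optional, Sequence
--
-- def _normalize_indices(indices: Iterable[int], total_frames: int) -> List[int]:
--     seen = set()
--     ordered: List[int] = []
--     for idx in indices:
--         if idx < 0 or idx >= total_frames:
--             continue
--         if idx in seen:
--             continue
--         seen.add(idx)
--         ordered.append(idx)
--     return sorted(ordered)
-- ===== SOURCE B (Python) =====
-- def _normalize_indices(indices, total_frames):
--     out = []
--     for i in sorted(indices):
--         if 0 <= i < total_frames and (not out or out[-1] != i):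
--             out.append(i)
--     return out
-- ===== Notes on version B (the rewrite author's own statement) =====
-- stated objective: alternative
-- what changed: Sorts the raw input first and dedups by comparing each element with the last one kept during a single sweep, instead of A's seen-set membership dedup in input order followed by a final sort.
import Mathlib
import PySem

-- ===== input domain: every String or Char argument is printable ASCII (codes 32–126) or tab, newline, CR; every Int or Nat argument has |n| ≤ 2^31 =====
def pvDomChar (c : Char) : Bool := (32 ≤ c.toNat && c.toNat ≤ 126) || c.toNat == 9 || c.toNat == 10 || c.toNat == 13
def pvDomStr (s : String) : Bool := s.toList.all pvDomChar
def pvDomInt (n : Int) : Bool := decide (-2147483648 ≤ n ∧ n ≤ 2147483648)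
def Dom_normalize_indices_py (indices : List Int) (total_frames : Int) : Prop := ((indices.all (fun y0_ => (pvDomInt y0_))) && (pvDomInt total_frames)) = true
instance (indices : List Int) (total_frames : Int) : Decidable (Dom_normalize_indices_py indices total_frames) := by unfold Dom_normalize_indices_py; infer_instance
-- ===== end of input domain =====

-- B sorts the raw input first and dedups/filters in one sweep by comparing each element with the
-- last one kept, instead of A's seen-set membership dedup in input order followed by a final sort.

-- ===== PORT A =====
def normalize_indices_py (indices : List Int) (total_frames : Int) : List Int :=
  let st := indices.foldl (fun (st : PySem.Set Int × List Int) idx =>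
    if idx < 0 ∨ total_frames ≤ idx then st
    else if PySem.Set.contains st.1 idx then st
    else (PySem.Set.add st.1 idx, st.2 ++ [idx])) (PySem.Set.empty, [])
  PySem.List.sorted st.2 (fun x => x) false

-- ===== PORT B =====
def normalize_indices_py_alt (indices : List Int) (total_frames : Int) : List Int :=
  (PySem.List.sorted indices (fun x => x) false).foldl
    (fun out i =>
      if (0 ≤ i ∧ i < total_frames) ∧ (out = [] ∨ PySem.List.pyGet? out (-1) ≠ some i)
      then out ++ [i] else out) []

-- ===== PRECONDITION & SPEC =====
def Spec_normalize_indices_py (indices : List Int) (total_frames : Int) (out : List Int) : Prop := out = normalize_indices_py_alt indices total_frames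
instance (indices : List Int) (total_frames : Int) (out : List Int) : Decidable (Spec_normalize_indices_py indices total_frames out) := by unfold Spec_normalize_indices_py; infer_instance

-- ===== CLAIM (what is proved, stated in full; the proofs are below) =====
def Claim_equal_normalize_indices_py : Prop := ∀ (indices : List Int) (total_frames : Int), Dom_normalize_indices_py indices total_frames → Spec_normalize_indices_py indices total_frames (normalize_indices_py indices total_frames)

-- ===== LEMMAS AND PROOFS =====

-- A's loop: the accumulated list is nodup and holds exactly the in-range elements seen so far.
lemma a_fold_inv (tf : Int) (l : List Int) (s : PySem.Set Int) (o : List Int)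
    (hs : ∀ x, x ∈ s ↔ x ∈ o) (ho : o.Nodup) :
    (∀ x, x ∈ (l.foldl (fun (st : PySem.Set Int × List Int) idx =>
        if idx < 0 ∨ tf ≤ idx then st
        else if PySem.Set.contains st.1 idx then st
        else (PySem.Set.add st.1 idx, st.2 ++ [idx])) (s, o)).2 ↔
      x ∈ o ∨ (x ∈ l ∧ 0 ≤ x ∧ x < tf)) ∧
    ((l.foldl (fun (st : PySem.Set Int × List Int) idx =>
        if idx < 0 ∨ tf ≤ idx then st
        else if PySem.Set.contains st.1 idx then st
        else (PySem.Set.add st.1 idx, st.2 ++ [idx])) (s, o)).2).Nodup := by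
  induction l generalizing s o with
  | nil =>
    refine ⟨fun x => ?_, by simpa using ho⟩
    simp
  | cons a t ih =>
    simp only [List.foldl_cons]
    by_cases hrange : a < 0 ∨ tf ≤ a
    · rw [if_pos hrange]
      obtain ⟨h1, h2⟩ := ih s o hs ho
      refine ⟨fun x => ?_, h2⟩
      rw [h1]
      simp only [List.mem_cons]
      have hfact : x = a → ¬(0 ≤ x ∧ x < tf) := by omega
      tauto
    · rw [if_neg hrange]
      by_cases hseen : PySem.Set.contains s a = true
      · rw [if_pos hseen]
        have ha : a ∈ o := (hs a).mp ((PySem.Set.contains_iff s a).mp hseen)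
        obtain ⟨h1, h2⟩ := ih s o hs ho
        refine ⟨fun x => ?_, h2⟩
        rw [h1]
        simp only [List.mem_cons]
        have hfact : x = a → x ∈ o := fun h => h ▸ ha
        tauto
      · rw [if_neg hseen]
        have hna : a ∉ o := fun h => hseen ((PySem.Set.contains_iff s a).mpr ((hs a).mpr h))
        have hs' : ∀ x, x ∈ PySem.Set.add s a ↔ x ∈ o ++ [a] := by
          intro x
          rw [PySem.Set.mem_add, List.mem_append, List.mem_singleton, hs]
        have ho' : (o ++ [a]).Nodup :=
          ho.append (List.nodup_singleton a) (by simpa [List.disjoint_singleton] using hna)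
        obtain ⟨h1, h2⟩ := ih (PySem.Set.add s a) (o ++ [a]) hs' ho'
        refine ⟨fun x => ?_, h2⟩
        rw [h1]
        simp only [List.mem_append, List.mem_cons, List.not_mem_nil, or_false]
        have hfact : x = a → (0 ≤ x ∧ x < tf) := by omega
        tauto

-- the last element of a strictly increasing list is its maximum
lemma max_getLast? (acc : List Int) (hp : acc.Pairwise (· < ·)) (m : Int)
    (h : acc.getLast? = some m) : ∀ y ∈ acc, y ≤ m := by
  induction acc with
  | nil => simp at h
  | cons a t ih =>
    intro y hy
    cases t with
    | nil =>
      simp at h hy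
      omega
    | cons b u =>
      rw [List.getLast?_cons_cons] at h
      have h1 : ∀ y ∈ b :: u, y ≤ m := ih hp.of_cons h
      rcases List.mem_cons.mp hy with rfl | hy'
      · have hab : y < b := (List.pairwise_cons.mp hp).1 b (by simp)
        have hbm : b ≤ m := h1 b (by simp)
        omega
      · exact h1 y hy'

-- B's sweep: over a nondecreasing list, the accumulator stays strictly increasing and collects
-- exactly the in-range elements.
lemma b_fold_inv (tf : Int) (l : List Int) : ∀ (acc : List Int),
    l.Pairwise (· ≤ ·) → acc.Pairwise (· < ·) → (∀ y ∈ acc, ∀ z ∈ l, y ≤ z) →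
    ((l.foldl (fun out i =>
        if (0 ≤ i ∧ i < tf) ∧ (out = [] ∨ PySem.List.pyGet? out (-1) ≠ some i)
        then out ++ [i] else out) acc).Pairwise (· < ·)) ∧
    (∀ x, x ∈ l.foldl (fun out i =>
        if (0 ≤ i ∧ i < tf) ∧ (out = [] ∨ PySem.List.pyGet? out (-1) ≠ some i)
        then out ++ [i] else out) acc ↔ x ∈ acc ∨ (x ∈ l ∧ 0 ≤ x ∧ x < tf)) := by
  induction l with
  | nil =>
    intro acc _ hacc _
    refine ⟨hacc, fun x => ?_⟩
    simp
  | cons a t ih =>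
    intro acc hl hacc hle
    simp only [List.foldl_cons]
    have hl' : t.Pairwise (· ≤ ·) := hl.of_cons
    have hat : ∀ z ∈ t, a ≤ z := (List.pairwise_cons.mp hl).1
    by_cases hg : (0 ≤ a ∧ a < tf) ∧ (acc = [] ∨ PySem.List.pyGet? acc (-1) ≠ some a)
    · rw [if_pos hg]
      have hlt : ∀ y ∈ acc, y < a := by
        intro y hy
        rcases eq_or_lt_of_le (hle y hy a (by simp)) with rfl | h
        · exfalso
          rcases hg.2 with hnil | hne
          · rw [hnil] at hy; simp at hy
          · obtain ⟨m, hm⟩ := Option.isSome_iff_exists.mp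
              (List.getLast?_isSome.mpr (List.ne_nil_of_mem hy))
            have hma : m ≤ y := hle m (List.mem_of_getLast? hm) y (by simp)
            have ham : y ≤ m := max_getLast? acc hacc m hm y hy
            apply hne
            rw [PySem.List.pyGet?_neg_one, hm]
            congr 1
            omega
        · exact h
      have hacc' : (acc ++ [a]).Pairwise (· < ·) := by
        rw [List.pairwise_append]
        exact ⟨hacc, List.pairwise_singleton _ _, by simpa using hlt⟩
      have hle' : ∀ y ∈ acc ++ [a], ∀ z ∈ t, y ≤ z := by
        intro y hy z hz
        rcases List.mem_append.mp hy with hy | hy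
        · exact hle y hy z (List.mem_cons_of_mem _ hz)
        · simp at hy
          exact hy ▸ hat z hz
      obtain ⟨h1, h2⟩ := ih (acc ++ [a]) hl' hacc' hle'
      refine ⟨h1, fun x => ?_⟩
      rw [h2 x]
      simp only [List.mem_append, List.mem_cons, List.not_mem_nil, or_false]
      have hfact : x = a → 0 ≤ x ∧ x < tf := fun h => h ▸ hg.1
      tauto
    · rw [if_neg hg]
      obtain ⟨h1, h2⟩ := ih acc hl' hacc (fun y hy z hz => hle y hy z (List.mem_cons_of_mem _ hz))
      refine ⟨h1, fun x => ?_⟩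
      rw [h2 x]
      simp only [List.mem_cons]
      by_cases hr : 0 ≤ a ∧ a < tf
      · have hga : acc ≠ [] ∧ PySem.List.pyGet? acc (-1) = some a := by tauto
        have ha : a ∈ acc := by
          apply List.mem_of_getLast?
          rw [← PySem.List.pyGet?_neg_one]
          exact hga.2
        have hfact : x = a → x ∈ acc := fun h => h ▸ ha
        tauto
      · have hfact : x = a → ¬(0 ≤ x ∧ x < tf) := fun h => h ▸ hr
        tauto

lemma alt_inv (indices : List Int) (total_frames : Int) :
    (normalize_indices_py_alt indices total_frames).Pairwise (· < ·) ∧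
    ∀ x, (x ∈ normalize_indices_py_alt indices total_frames ↔
      x ∈ indices ∧ 0 ≤ x ∧ x < total_frames) := by
  unfold normalize_indices_py_alt
  obtain ⟨h1, h2⟩ := b_fold_inv total_frames (PySem.List.sorted indices (fun x => x) false) []
    (PySem.List.sorted_pairwise indices (fun x => x)) List.Pairwise.nil (by simp)
  refine ⟨h1, fun x => ?_⟩
  rw [h2 x, PySem.List.mem_sorted]
  simp

-- ===== VERDICT (by name: the statement is the Claim_ definition above) =====
theorem normalize_indices_py_spec : Claim_equal_normalize_indices_py := by
  intro indices total_frames _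
  unfold Spec_normalize_indices_py normalize_indices_py
  obtain ⟨h1, h2⟩ := a_fold_inv total_frames indices PySem.Set.empty []
    (by simp [PySem.Set.empty]) List.nodup_nil
  obtain ⟨hpw, hmem⟩ := alt_inv indices total_frames
  have hnd : (normalize_indices_py_alt indices total_frames).Nodup :=
    hpw.imp (fun h => ne_of_lt h)
  have hperm : (normalize_indices_py_alt indices total_frames).Perm
      (indices.foldl (fun (st : PySem.Set Int × List Int) idx =>
        if idx < 0 ∨ total_frames ≤ idx then st
        else if PySem.Set.contains st.1 idx then st
        else (PySem.Set.add st.1 idx, st.2 ++ [idx])) (PySem.Set.empty, [])).2 := by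
    rw [List.perm_ext_iff_of_nodup hnd h2]
    intro x
    rw [hmem x, h1]
    simp
  simpa using PySem.List.sorted_eq_of_perm_of_pairwise_lt _ _ (fun x => x) hperm hpw
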